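-- pv_equiv track=rewrite | github.com/JamesJoe0830/ps_study | week4/모의고사.py | solution
-- ===== SOURCE A (Python) =====
-- def solution(answers):
--     answer = []
--     a =[1,2,3,4,5]*len(answers)
--     b =[2, 1, 2, 3, 2, 4, 2, 5]*len(answers)
--     c =[3, 3, 1, 1, 2, 2, 4, 4, 5, 5]*len(answers)
--     count_a = count_b = count_c = 0
--     arr =[]
--     for i in range(len(answers)):
--         if answers[i] == a[i]:
--             count_a += 1
--         if answers[i] == b[i]:
--             count_b += 1
--         if answers[i] == c[i]:
--             count_c += 1
-- # 여기서 아래부분이 핵심 max 와 arr 가 같다면 각각의 1,2,3을 출력해옴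
--     arr = [count_a,count_b,count_c]
--     cnt = max(count_a, count_b, count_c)
--     for j in range(len(arr)) :
--         if cnt == arr[j] :
--             answer.append(j+1)
--     return answer
-- ===== SOURCE B (Python) =====
-- def solution(answers):
--     P = 40  # lcm of the pattern periods 5, 8, 10
--     hist = {}
--     for i, x in enumerate(answers):
--         k = (i % P, x)
--         hist[k] = hist.get(k, 0) + 1
--     patterns = [[1, 2, 3, 4, 5],
--                 [2, 1, 2, 3, 2, 4, 2, 5],
--                 [3, 3, 1, 1, 2, 2, 4, 4, 5, 5]]
--     counts = [sum(hist.get((r, p[r % len(p)]), 0) for r in range(P))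
--               for p in patterns]
--     best = max(counts)
--     return [j + 1 for j, c in enumerate(counts) if c == best]
-- ===== Notes on version B (the rewrite author's own statement) =====
-- stated objective: alternative
-- what changed: B replaces A's fused loop that materializes three full-length repeated answer lists and compares element-wise with three accumulators by a two-stage computation: one pass builds a histogram keyed by (index mod 40, answer) (40 = lcm of the periods 5, 8, 10), then each pattern's score is a 40-term sum of histogram lookups, with no per-element pattern comparison at all.
import Mathlib
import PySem

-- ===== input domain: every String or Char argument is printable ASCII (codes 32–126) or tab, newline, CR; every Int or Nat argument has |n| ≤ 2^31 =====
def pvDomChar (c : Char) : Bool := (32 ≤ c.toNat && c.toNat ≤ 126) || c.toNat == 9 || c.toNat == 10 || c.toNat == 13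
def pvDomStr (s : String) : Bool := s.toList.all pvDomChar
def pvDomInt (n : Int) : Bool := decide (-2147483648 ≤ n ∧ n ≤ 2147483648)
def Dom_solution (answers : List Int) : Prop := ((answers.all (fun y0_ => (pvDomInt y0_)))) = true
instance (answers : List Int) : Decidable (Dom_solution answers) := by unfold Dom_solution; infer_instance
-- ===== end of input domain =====

-- B replaces A's fused compare-and-count loop over three materialized repeated lists by a
-- two-stage computation: one pass builds a histogram keyed by (index mod 40, answer), then each
-- pattern's score is a 40-term sum over that table (objective: alternative).


-- ===== PORT A =====
-- a = [1,2,3,4,5]*len(answers) etc.; answers[i] / a[i] are ported with getD, exact here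
-- because every index i ∈ range(len(answers)) is in range of both lists.
def solution (answers : List Int) : List Int :=
  let n := answers.length
  let a := (List.replicate n [1, 2, 3, 4, 5]).flatten
  let b := (List.replicate n [2, 1, 2, 3, 2, 4, 2, 5]).flatten
  let c := (List.replicate n [3, 3, 1, 1, 2, 2, 4, 4, 5, 5]).flatten
  let cs := (List.range n).foldl
    (fun (s : Int × Int × Int) i =>
      (s.1 + (if answers.getD i 0 = a.getD i 0 then 1 else 0),
       s.2.1 + (if answers.getD i 0 = b.getD i 0 then 1 else 0),
       s.2.2 + (if answers.getD i 0 = c.getD i 0 then 1 else 0)))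
    (0, 0, 0)
  let arr := [cs.1, cs.2.1, cs.2.2]
  let cnt := max cs.1 (max cs.2.1 cs.2.2)
  (List.range 3).foldl
    (fun ans j => if cnt = arr.getD j 0 then ans ++ [(j : Int) + 1] else ans) []

-- ===== PORT B =====
-- hist[k] = hist.get(k, 0) + 1  is  Dict.modify k 0 (· + 1);  i and r are nonnegative Python
-- ints, so Int.mod is exact, and p[r % len(p)] is an in-range index, so pyGetD is exact.
def histB (answers : List Int) : PySem.Dict (Int × Int) Int :=
  (PySem.List.enumerate answers 0).foldl
    (fun d ix => d.modify (PySem.Int.mod ix.1 40, ix.2) 0 (· + 1)) PySem.Dict.empty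

def patCount (hist : PySem.Dict (Int × Int) Int) (p : List Int) : Int :=
  ((PySem.List.pyRange 0 40 1).map
    (fun r => hist.getD (r, PySem.List.pyGetD p (PySem.Int.mod r (p.length : Int)) 0) 0)).sum

def solution_alt (answers : List Int) : List Int :=
  let hist := histB answers
  let patterns : List (List Int) :=
    [[1, 2, 3, 4, 5], [2, 1, 2, 3, 2, 4, 2, 5], [3, 3, 1, 1, 2, 2, 4, 4, 5, 5]]
  let counts := patterns.map (patCount hist)
  let best := (PySem.List.max? counts (fun x => x)).getD 0   -- max(counts), counts nonempty
  (PySem.List.enumerate counts 0).foldl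
    (fun acc jc => if jc.2 = best then acc ++ [jc.1 + 1] else acc) []

-- ===== PRECONDITION & SPEC =====
def Spec_solution (answers : List Int) (out : List Int) : Prop := out = solution_alt answers
instance (answers : List Int) (out : List Int) : Decidable (Spec_solution answers out) := by unfold Spec_solution; infer_instance

-- ===== CLAIM (what is proved, stated in full; the proofs are below) =====
def Claim_equal_solution : Prop := ∀ (answers : List Int), Dom_solution answers → Spec_solution answers (solution answers)

-- ===== LEMMAS AND PROOFS =====

-- A map summing to zero pointwise sums to zero.
theorem sum_map_zero {α : Type} (l : List α) (f : α → Int) (h : ∀ x ∈ l, f x = 0) :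
    (l.map f).sum = 0 := by
  rw [List.sum_eq_zero]; intro x hx
  rcases List.mem_map.mp hx with ⟨a, ha, rfl⟩; exact h a ha

-- Summing the indicator of one element over a duplicate-free list containing it gives 1.
theorem sum_ite_eq_one {l : List Int} {a : Int} (hn : l.Nodup) (ha : a ∈ l) :
    (l.map (fun r => if r = a then (1 : Int) else 0)).sum = 1 := by
  induction l with
  | nil => cases ha
  | cons x t ih =>
    rcases List.nodup_cons.mp hn with ⟨hx, ht⟩
    by_cases hxa : x = a
    · subst hxa
      simp only [List.map_cons, List.sum_cons]
      rw [sum_map_zero t _ (fun r hr => if_neg (fun h : r = x => hx (h ▸ hr)))]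
      simp
    · have ha' : a ∈ t := by cases ha with
        | head => exact absurd rfl hxa
        | tail _ h => exact h
      simp only [List.map_cons, List.sum_cons, if_neg hxa, ih ht ha', zero_add]

-- Summing histogram entries along r ↦ (r, f r) over the 40 residues counts the keys
-- whose value matches their residue's pattern value.
theorem sum_count_eq_countP (L : List (Int × Int)) (f : Int → Int)
    (hL : ∀ q ∈ L, 0 ≤ q.1 ∧ q.1 < 40) :
    ((PySem.List.pyRange 0 40 1).map (fun r => (L.count (r, f r) : Int))).sum
      = (L.countP (fun q => q.2 = f q.1) : Int) := by
  induction L with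
  | nil => simp
  | cons q T ih =>
    have hq := hL q List.mem_cons_self
    have hT : ∀ x ∈ T, 0 ≤ x.1 ∧ x.1 < 40 := fun x hx => hL x (List.mem_cons_of_mem _ hx)
    have hcnt : ∀ r : Int, ((q :: T).count (r, f r) : Int)
        = (T.count (r, f r) : Int) + (if (r, f r) = q then 1 else 0) := by
      intro r
      rw [List.count_cons]
      by_cases h : (r, f r) = q
      · rw [if_pos h]; simp [h.symm]
      · rw [if_neg h]
        have : (q == (r, f r)) = false := by
          simp; exact fun hh => h hh.symm
        simp [this]
    simp only [hcnt]
    rw [PySem.List.sum_map_add_int, ih hT, List.countP_cons]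
    by_cases h2 : q.2 = f q.1
    · have : ∀ r ∈ PySem.List.pyRange 0 40 1,
          (if (r, f r) = q then (1 : Int) else 0) = (if r = q.1 then 1 else 0) := by
        intro r _
        by_cases hr : r = q.1
        · subst hr; simp [Prod.ext_iff, h2]
        · rw [if_neg hr, if_neg (fun h => hr (congrArg Prod.fst h))]
      rw [List.map_congr_left this,
        sum_ite_eq_one (PySem.List.nodup_pyRange_one 0 40)
          (PySem.List.mem_pyRange_one.mpr ⟨hq.1, hq.2⟩)]
      simp [h2]
    · rw [sum_map_zero _ _ (fun r _ => if_neg (fun h => h2 (by rw [← h])))]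
      simp [h2]

-- The histogram's entry at k counts the occurrences of the key k.
theorem histB_getD (answers : List Int) (k : Int × Int) :
    (histB answers).getD k 0
      = (((PySem.List.enumerate answers 0).map
            (fun ix => (PySem.Int.mod ix.1 40, ix.2))).count k : Int) := by
  unfold histB
  have h : ∀ (l : List (Int × Int)) (d : PySem.Dict (Int × Int) Int),
      l.foldl (fun d ix => d.modify (PySem.Int.mod ix.1 40, ix.2) 0 (· + 1)) d
        = (l.map (fun ix => (PySem.Int.mod ix.1 40, ix.2))).foldl
            (fun d x => d.modify x 0 (· + 1)) d := by
    intro l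
    induction l with
    | nil => intro d; rfl
    | cons x t ih => intro d; simp only [List.foldl_cons, List.map_cons]; exact ih _
  rw [h, PySem.Dict.getD_foldl_modify_add_one, PySem.Dict.getD_empty, zero_add]

-- Indexing a repeated list is modulo indexing into the pattern.
theorem getD_flatten_replicate (p : List Int) (n i : Nat) (h : i < n * p.length) :
    ((List.replicate n p).flatten).getD i 0 = p.getD (i % p.length) 0 := by
  induction n generalizing i with
  | zero => omega
  | succ m ih =>
    have hflat : (List.replicate (m + 1) p).flatten = p ++ (List.replicate m p).flatten := by
      simp [List.replicate_succ]
    rw [hflat]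
    by_cases hi : i < p.length
    · rw [List.getD_append _ _ _ _ hi, Nat.mod_eq_of_lt hi]
    · rw [Nat.not_lt] at hi
      have hlt : i - p.length < m * p.length := by
        have h2 : (m + 1) * p.length = m * p.length + p.length := by ring
        omega
      rw [List.getD_append_right _ _ _ _ hi, ih _ hlt, Nat.mod_eq_sub_mod hi]

-- A fold over range n hitting xs.getD is a fold over zipIdx.
theorem map_range_getD {γ : Type} (xs : List Int) (f : Int → Nat → γ) :
    (List.range xs.length).map (fun i => f (xs.getD i 0) i)
      = xs.zipIdx.map (fun xi => f xi.1 xi.2) := by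
  apply List.ext_getElem
  · simp
  · intro k h1 h2
    simp only [List.length_map, List.length_range] at h1
    simp [List.getD_eq_getElem?_getD, List.getElem?_eq_getElem h1]

-- A fused three-accumulator fold splits into three independent folds.
theorem foldl_triple {ι : Type} (l : List ι) (f g h : ι → Int) (a b c : Int) :
    l.foldl (fun s x => (s.1 + f x, s.2.1 + g x, s.2.2 + h x)) (a, b, c)
      = (l.foldl (fun s x => s + f x) a,
         l.foldl (fun s x => s + g x) b,
         l.foldl (fun s x => s + h x) c) := by
  induction l generalizing a b c with
  | nil => rfl
  | cons x t ih => simpa using ih (a + f x) (b + g x) (c + h x)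

-- A's per-pattern count is the number of indices whose answer matches the pattern mod its period.
theorem aCount_eq_countP (xs p : List Int) (hp : 0 < p.length) :
    (List.range xs.length).foldl
        (fun s i =>
          s + (if xs.getD i 0 = ((List.replicate xs.length p).flatten).getD i 0
               then 1 else 0)) 0
      = (xs.zipIdx.countP (fun xi => xi.1 = p.getD (xi.2 % p.length) 0) : Int) := by
  rw [PySem.List.foldl_add, zero_add]
  rw [List.map_congr_left (fun i hi => by
    rw [getD_flatten_replicate p xs.length i
      (lt_of_lt_of_le (List.mem_range.mp hi) (Nat.le_mul_of_pos_right _ hp))])]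
  rw [map_range_getD xs
    (fun x i => if x = p.getD (i % p.length) 0 then (1 : Int) else 0)]
  have h := PySem.List.sum_map_ite_one_zero
    (fun xi : Int × Nat => decide (xi.1 = p.getD (xi.2 % p.length) 0)) xs.zipIdx
  simp only [decide_eq_true_eq] at h
  exact h

-- B's per-pattern score is the same count (the pattern period divides 40).
theorem patCount_eq_countP (answers p : List Int) (_hp : 0 < p.length) (hd : p.length ∣ 40) :
    patCount (histB answers) p
      = (answers.zipIdx.countP (fun xi => xi.1 = p.getD (xi.2 % p.length) 0) : Int) := by
  unfold patCount
  rw [List.map_congr_left (fun r _ => histB_getD answers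
        (r, PySem.List.pyGetD p (PySem.Int.mod r (p.length : Int)) 0)),
      sum_count_eq_countP _ _ ?_]
  · rw [List.countP_map, PySem.List.enumerate_eq_zipIdx_map, List.countP_map]
    congr 1
    apply List.countP_congr
    intro xi _
    have h40 : PySem.Int.mod ((0 : Int) + (xi.2 : Int)) 40 = ((xi.2 % 40 : Nat) : Int) := by
      rw [zero_add]; exact_mod_cast PySem.Int.mod_natCast xi.2 40
    simp only [Function.comp_apply, h40]
    have hmod : PySem.Int.mod ((xi.2 % 40 : Nat) : Int) ((p.length : Nat) : Int)
        = ((xi.2 % p.length : Nat) : Int) := by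
      rw [PySem.Int.mod_natCast, Nat.mod_mod_of_dvd _ hd]
    simp only [hmod, PySem.List.pyGetD_natCast]
  · intro q hq
    rcases List.mem_map.mp hq with ⟨ix, _, rfl⟩
    exact ⟨PySem.Int.mod_nonneg _ (by norm_num), PySem.Int.mod_lt _ (by norm_num)⟩

-- With the three counts abstracted, A's selection loop and B's selection loop agree.
theorem finals (c1 c2 c3 : Int) :
    (List.range 3).foldl
      (fun ans j => if max c1 (max c2 c3) = [c1, c2, c3].getD j 0 then ans ++ [(j : Int) + 1] else ans) []
    = (PySem.List.enumerate [c1, c2, c3] 0).foldl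
      (fun acc jc => if jc.2 = (PySem.List.max? [c1, c2, c3] (fun x => x)).getD 0 then acc ++ [jc.1 + 1] else acc) [] := by
  have hr : List.range 3 = [0, 1, 2] := rfl
  simp only [PySem.List.max?_id_cons, Option.getD_some, hr,
    PySem.List.enumerate_cons, PySem.List.enumerate_nil,
    List.foldl_cons, List.foldl_nil, List.getD_cons_zero, List.getD_cons_succ]
  norm_num [max_assoc, eq_comm]

-- ===== VERDICT (by name: the statement is the Claim_ definition above) =====
theorem solution_spec : Claim_equal_solution := by
  intro answers _
  unfold Spec_solution solution solution_alt
  simp only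
  rw [foldl_triple]
  rw [aCount_eq_countP answers [1, 2, 3, 4, 5] (by simp),
      aCount_eq_countP answers [2, 1, 2, 3, 2, 4, 2, 5] (by simp),
      aCount_eq_countP answers [3, 3, 1, 1, 2, 2, 4, 4, 5, 5] (by simp)]
  rw [List.map_cons, List.map_cons, List.map_cons, List.map_nil,
      patCount_eq_countP answers [1, 2, 3, 4, 5] (by simp) (by decide),
      patCount_eq_countP answers [2, 1, 2, 3, 2, 4, 2, 5] (by simp) (by decide),
      patCount_eq_countP answers [3, 3, 1, 1, 2, 2, 4, 4, 5, 5] (by simp) (by decide)]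
  exact finals _ _ _
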